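-- pv_equiv track=rewrite | github.com/bukuishiwo2/kaiti_yolopose_framework | scripts/build_urfall_labels.py | frames_to_segments
-- ===== SOURCE A (Python) =====
-- def frames_to_segments(frames: list[int]) -> list[tuple[int, int]]:
--     if not frames:
--         return []
--     frames = sorted(set(frames))
--     segs: list[tuple[int, int]] = []
--     start = prev = frames[0]
--     for f in frames[1:]:
--         if f == prev + 1:
--             prev = f
--             continue
--         segs.append((start, prev))
--         start = prev = f
--     segs.append((start, prev))
--     return segs
-- ===== SOURCE B (Python) =====
-- def frames_to_segments(frames: list[int]) -> list[tuple[int, int]]: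
--     s = set(frames)
--     starts = sorted(x for x in s if x - 1 not in s)
--     ends = sorted(x for x in s if x + 1 not in s)
--     return list(zip(starts, ends))
-- ===== Notes on version B (the rewrite author's own statement) =====
-- stated objective: alternative
-- what changed: Replaces A's sort-then-scan run-collapsing state machine by a set-membership characterization: x starts a segment iff x-1 is not in the set and ends one iff x+1 is not, so B sorts the starts and the ends independently and zips them, with no run-tracking pass at all.
import Mathlib
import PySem

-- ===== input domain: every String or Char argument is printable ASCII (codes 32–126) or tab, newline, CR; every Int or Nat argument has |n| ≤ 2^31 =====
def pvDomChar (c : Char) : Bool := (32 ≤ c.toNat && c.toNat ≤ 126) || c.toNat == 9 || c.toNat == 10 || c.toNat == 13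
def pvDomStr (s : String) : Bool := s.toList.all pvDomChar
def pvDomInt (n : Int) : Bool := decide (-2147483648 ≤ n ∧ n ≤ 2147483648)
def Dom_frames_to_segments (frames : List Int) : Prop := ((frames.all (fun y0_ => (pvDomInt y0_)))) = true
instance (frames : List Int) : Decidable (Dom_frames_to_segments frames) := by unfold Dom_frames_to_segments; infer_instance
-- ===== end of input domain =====

-- B replaces A's run-collapsing state machine over sorted(set(frames)) by a set-membership
-- characterization: x starts a segment iff x-1 ∉ set, ends one iff x+1 ∉ set; zip sorted
-- starts with sorted ends (alternative algorithm, same cost).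

-- ===== PORT A =====
-- the for-loop over frames[1:] with state (start, prev, segs)
def pvALoop (start prev : Int) (segs : List (Int × Int)) : List Int → List (Int × Int)
  | [] => segs ++ [(start, prev)]
  | f :: rest =>
    if f = prev + 1 then pvALoop start f segs rest
    else pvALoop f f (segs ++ [(start, prev)]) rest

def frames_to_segments (frames : List Int) : List (Int × Int) :=
  if frames = [] then []
  else
    match PySem.List.sorted (PySem.Set.ofList frames) (fun x => x) false with
    | [] => []  -- unreachable: sorted(set(frames)) of a nonempty list is nonempty
    | x :: rest => pvALoop x x [] rest

-- ===== PORT B =====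
def frames_to_segments_alt (frames : List Int) : List (Int × Int) :=
  let s := PySem.Set.ofList frames
  let starts := PySem.List.sorted (s.filter (fun x => !(PySem.Set.contains s (x - 1)))) (fun x => x) false
  let ends := PySem.List.sorted (s.filter (fun x => !(PySem.Set.contains s (x + 1)))) (fun x => x) false
  List.zip starts ends

-- ===== PRECONDITION & SPEC =====
def Spec_frames_to_segments (frames : List Int) (out : List (Int × Int)) : Prop := out = frames_to_segments_alt frames
instance (frames : List Int) (out : List (Int × Int)) : Decidable (Spec_frames_to_segments frames out) := by unfold Spec_frames_to_segments; infer_instance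

-- ===== CLAIM (what is proved, stated in full; the proofs are below) =====
def Claim_equal_frames_to_segments : Prop := ∀ (frames : List Int), Dom_frames_to_segments frames → Spec_frames_to_segments frames (frames_to_segments frames)

-- ===== LEMMAS AND PROOFS =====

-- the segment list A's loop produces from state (start, prev), without the accumulator
def pvRuns (start prev : Int) : List Int → List (Int × Int)
  | [] => [(start, prev)]
  | f :: rest =>
    if f = prev + 1 then pvRuns start f rest
    else (start, prev) :: pvRuns f f rest

-- the maximal consecutive chain continuing prev, and the remainder
def pvCT (prev : Int) : List Int → List Int
  | [] => []
  | f :: rest => if f = prev + 1 then f :: pvCT f rest else []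

def pvCD (prev : Int) : List Int → List Int
  | [] => []
  | f :: rest => if f = prev + 1 then pvCD f rest else f :: rest

theorem pvALoop_eq_runs (l : List Int) : ∀ (start prev : Int) (segs : List (Int × Int)),
    pvALoop start prev segs l = segs ++ pvRuns start prev l := by
  induction l with
  | nil => intro start prev segs; simp [pvALoop, pvRuns]
  | cons f rest ih =>
    intro start prev segs
    by_cases h : f = prev + 1 <;> simp [pvALoop, pvRuns, h, ih]

theorem pvRuns_chain (rest : List Int) : ∀ (start prev : Int),
    pvRuns start prev rest =
      (start, (pvCT prev rest).getLastD prev) ::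
        (match pvCD prev rest with
         | [] => []
         | y :: ys => pvRuns y y ys) := by
  induction rest with
  | nil => intro start prev; simp [pvRuns, pvCT, pvCD]
  | cons f rest ih =>
    intro start prev
    by_cases h : f = prev + 1
    · simp only [pvRuns, if_pos h, pvCT, pvCD, ih start f, List.getLastD_cons]
    · simp [pvRuns, pvCT, pvCD, h]

theorem pvSplit (t : List Int) : ∀ prev, t = pvCT prev t ++ pvCD prev t := by
  induction t with
  | nil => intro prev; simp [pvCT, pvCD]
  | cons f rest ih =>
    intro prev
    by_cases h : f = prev + 1
    · simp only [pvCT, pvCD, if_pos h, List.cons_append]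
      exact congrArg (f :: ·) (ih f)
    · simp [pvCT, pvCD, h]

theorem pvCD_len (rest : List Int) : ∀ prev, (pvCD prev rest).length ≤ rest.length := by
  induction rest with
  | nil => intro prev; simp [pvCD]
  | cons f rest ih =>
    intro prev
    by_cases h : f = prev + 1
    · simp only [pvCD, if_pos h, List.length_cons]
      exact le_trans (ih f) (Nat.le_succ _)
    · simp [pvCD, h]

theorem pvCT_last_ge (t : List Int) : ∀ prev, prev ≤ (pvCT prev t).getLastD prev := by
  induction t with
  | nil => intro prev; simp [pvCT]
  | cons f rest ih =>
    intro prev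
    by_cases h : f = prev + 1
    · simp only [pvCT, if_pos h, List.getLastD_cons]
      have := ih f; omega
    · simp [pvCT, h]

theorem pvCT_mem (t : List Int) : ∀ (prev y : Int),
    y ∈ pvCT prev t ↔ prev + 1 ≤ y ∧ y ≤ (pvCT prev t).getLastD prev := by
  induction t with
  | nil => intro prev y; simp [pvCT]
  | cons f rest ih =>
    intro prev y
    by_cases h : f = prev + 1
    · have hlast := pvCT_last_ge rest f
      simp only [pvCT, if_pos h, List.mem_cons, List.getLastD_cons, ih f y]
      omega
    · simp [pvCT, h]

theorem pvCD_head (t : List Int) : ∀ (prev f : Int) (ys : List Int),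
    pvCD prev t = f :: ys → f ≠ (pvCT prev t).getLastD prev + 1 := by
  induction t with
  | nil => intro prev f ys h; simp [pvCD] at h
  | cons g rest ih =>
    intro prev f ys h
    by_cases hg : g = prev + 1
    · simp only [pvCD, if_pos hg] at h
      simp only [pvCT, if_pos hg, List.getLastD_cons]
      exact ih g f ys h
    · simp only [pvCD, if_neg hg] at h
      simp only [pvCT, if_neg hg, List.getLastD_nil]
      injection h with h1 h2
      rw [← h1]; exact hg

-- filter keeping exactly one element of a nodup list
theorem pvFilterBeq (l : List Int) (m : Int) (hn : l.Nodup) (hm : m ∈ l) :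
    l.filter (fun y => y == m) = [m] := by
  induction l with
  | nil => cases hm
  | cons a t ih =>
    rcases List.nodup_cons.mp hn with ⟨ha, ht⟩
    by_cases ham : a = m
    · subst ham
      have : t.filter (fun y => y == a) = [] :=
        List.filter_eq_nil_iff.mpr (fun y hy => by simp; rintro rfl; exact ha hy)
      simp [this]
    · have hmt : m ∈ t := by rcases List.mem_cons.mp hm with h | h; exact absurd h.symm ham; exact h
      simp only [List.filter_cons, beq_iff_eq, ham, ite_false]
      simpa [ham] using ih ht hmt

-- the core equivalence: on a strictly increasing list x :: rest, A's run collapse equals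
-- zipping the elements with no predecessor against the elements with no successor
theorem pvMain : ∀ (n : Nat) (x : Int) (rest : List Int), rest.length ≤ n →
    (x :: rest).Pairwise (· < ·) →
    pvRuns x x rest = List.zip
      ((x :: rest).filter (fun y => !decide ((y - 1) ∈ x :: rest)))
      ((x :: rest).filter (fun y => !decide ((y + 1) ∈ x :: rest))) := by
  intro n
  induction n with
  | zero =>
    intro x rest hn hp
    have hr : rest = [] := List.eq_nil_of_length_eq_zero (Nat.le_zero.mp hn)
    subst hr
    simp [pvRuns, List.filter]
  | succ n ih =>
    intro x rest hn hp
    set ct := pvCT x rest with hct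
    set d := pvCD x rest with hd
    set m := ct.getLastD x with hm
    have hsplit : rest = ct ++ d := pvSplit rest x
    have hxm : x ≤ m := pvCT_last_ge rest x
    have hmemct : ∀ y, y ∈ ct ↔ x + 1 ≤ y ∧ y ≤ m := fun y => pvCT_mem rest x y
    -- pairwise decomposition
    have hxlt : ∀ y ∈ rest, x < y := (List.pairwise_cons.mp hp).1
    have hrestp : rest.Pairwise (· < ·) := (List.pairwise_cons.mp hp).2
    have happ := (List.pairwise_append.mp (hsplit ▸ hrestp))
    have hdp : d.Pairwise (· < ·) := happ.2.1
    -- every element of d is ≥ m + 2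
    have hdge : ∀ b ∈ d, m + 2 ≤ b := by
      intro b hb
      cases hhd : d with
      | nil => rw [hhd] at hb; cases hb
      | cons h ys =>
        have hne : h ≠ m + 1 := pvCD_head rest x h ys (by rw [← hd]; exact hhd)
        have hhm : m < h := by
          by_cases hmx : m = x
          · rw [hmx]; exact hxlt h (hsplit ▸ (List.mem_append.mpr (Or.inr (hhd ▸ List.mem_cons_self))))
          · have : m ∈ ct := (hmemct m).mpr ⟨by omega, le_refl m⟩
            exact happ.2.2 m this h (hhd ▸ List.mem_cons_self)
        have hge : m + 2 ≤ h := by omega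
        rw [hhd] at hb
        rcases List.mem_cons.mp hb with rfl | hbys
        · exact hge
        · have := (List.pairwise_cons.mp (hhd ▸ hdp)).1 b hbys; omega
    -- membership in the full list
    have hmeml : ∀ z, z ∈ x :: rest ↔ (z = x ∨ z ∈ ct) ∨ z ∈ d := by
      intro z
      rw [hsplit]
      simp [List.mem_cons, List.mem_append, or_assoc]
    -- run = x :: ct; its nodup
    have hrunp : (x :: ct).Pairwise (· < ·) := by
      refine List.pairwise_cons.mpr ⟨fun y hy => hxlt y (hsplit ▸ List.mem_append.mpr (Or.inl hy)), happ.1⟩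
    have hrunnd : (x :: ct).Nodup := hrunp.imp (fun h => Int.ne_of_lt h)
    -- start filter on the run is [x]
    have hfs_run : (x :: ct).filter (fun y => !decide ((y - 1) ∈ x :: rest)) = [x] := by
      have hpq : ∀ y ∈ x :: ct, (!decide ((y - 1) ∈ x :: rest)) = (y == x) := by
        intro y hy
        have hy' : y = x ∨ (x + 1 ≤ y ∧ y ≤ m) := by
          rcases List.mem_cons.mp hy with h | h
          · exact Or.inl h
          · exact Or.inr ((hmemct y).mp h)
        by_cases hyx : y = x
        · subst hyx
          have : ¬ ((y - 1) ∈ y :: rest) := by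
            rw [hmeml]
            rintro ((h | h) | h)
            · omega
            · have := (hmemct _).mp h; omega
            · have := hdge _ h; omega
          simp [this]
        · have hyr : x + 1 ≤ y ∧ y ≤ m := by rcases hy' with h | h; exact absurd h hyx; exact h
          have : (y - 1) ∈ x :: rest := by
            rw [hmeml]
            by_cases h1 : y - 1 = x
            · exact Or.inl (Or.inl h1)
            · exact Or.inl (Or.inr ((hmemct _).mpr (by omega)))
          simp [this, hyx]
      rw [List.filter_congr hpq]
      exact pvFilterBeq (x :: ct) x hrunnd List.mem_cons_self
    -- end filter on the run is [m]
    have hfe_run : (x :: ct).filter (fun y => !decide ((y + 1) ∈ x :: rest)) = [m] := by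
      have hmrun : m ∈ x :: ct := by
        by_cases hmx : m = x
        · exact hmx ▸ List.mem_cons_self
        · exact List.mem_cons.mpr (Or.inr ((hmemct m).mpr ⟨by omega, le_refl m⟩))
      have hpq : ∀ y ∈ x :: ct, (!decide ((y + 1) ∈ x :: rest)) = (y == m) := by
        intro y hy
        have hy' : x ≤ y ∧ y ≤ m := by
          rcases List.mem_cons.mp hy with h | h
          · exact ⟨by omega, by omega⟩
          · have := (hmemct y).mp h; omega
        by_cases hym : y = m
        · have : ¬ ((y + 1) ∈ x :: rest) := by
            rw [hmeml]
            rintro ((h | h) | h)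
            · omega
            · have := (hmemct _).mp h; omega
            · have := hdge _ h; omega
          rw [hym] at this
          simpa [hym] using this
        · have : (y + 1) ∈ x :: rest := by
            rw [hmeml]
            exact Or.inl (Or.inr ((hmemct _).mpr (by omega)))
          simp [this, hym]
      rw [List.filter_congr hpq]
      exact pvFilterBeq (x :: ct) m hrunnd hmrun
    -- on d, membership in the full list reduces to membership in d
    have hfs_d : d.filter (fun y => !decide ((y - 1) ∈ x :: rest))
        = d.filter (fun y => !decide ((y - 1) ∈ d)) := by
      refine List.filter_congr (fun y hy => ?_)
      have hyge := hdge y hy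
      have : ((y - 1) ∈ x :: rest) ↔ ((y - 1) ∈ d) := by
        rw [hmeml]
        constructor
        · rintro ((h | h) | h)
          · omega
          · have := (hmemct _).mp h; omega
          · exact h
        · exact fun h => Or.inr h
      simp [this]
    have hfe_d : d.filter (fun y => !decide ((y + 1) ∈ x :: rest))
        = d.filter (fun y => !decide ((y + 1) ∈ d)) := by
      refine List.filter_congr (fun y hy => ?_)
      have hyge := hdge y hy
      have : ((y + 1) ∈ x :: rest) ↔ ((y + 1) ∈ d) := by
        rw [hmeml]
        constructor
        · rintro ((h | h) | h)
          · omega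
          · have := (hmemct _).mp h; omega
          · exact h
        · exact fun h => Or.inr h
      simp [this]
    -- assemble
    have hlform : x :: rest = (x :: ct) ++ d := by rw [hsplit]; rfl
    have hkey : ∀ (p : Int → Bool),
        List.filter p (x :: rest) = List.filter p (x :: ct) ++ List.filter p d := by
      intro p
      conv_lhs => rw [hlform]
      exact List.filter_append _ _
    rw [pvRuns_chain rest x x, ← hct, ← hd, ← hm]
    rw [hkey, hkey, hfs_run, hfe_run, hfs_d, hfe_d]
    cases hhd : d with
    | nil => simp
    | cons h ys =>
      have hys : ys.length ≤ n := by
        have h1 := pvCD_len rest x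
        rw [← hd, hhd] at h1
        simp only [List.length_cons] at h1
        omega
      have hdp' : (h :: ys).Pairwise (· < ·) := hhd ▸ hdp
      show (x, m) :: pvRuns h h ys = _
      rw [ih h ys hys hdp']
      simp

theorem pvOfList_ne_nil {frames : List Int} (h : frames ≠ []) : PySem.Set.ofList frames ≠ [] := by
  obtain ⟨f, rest, rfl⟩ := List.exists_cons_of_ne_nil h
  intro hcon
  have : f ∈ PySem.Set.ofList (f :: rest) := by
    rw [PySem.Set.mem_ofList]; exact List.mem_cons_self
  rw [hcon] at this
  exact List.not_mem_nil this

-- B's sorted-filter-over-the-set equals the filter over sorted(set(frames))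
theorem pvSortedFilter (frames : List Int) (g : Int → Int) :
    PySem.List.sorted
      ((PySem.Set.ofList frames).filter (fun x => !(PySem.Set.contains (PySem.Set.ofList frames) (g x))))
      (fun x => x) false
    = (PySem.List.sorted (PySem.Set.ofList frames) (fun x => x) false).filter
        (fun y => !decide ((g y) ∈ PySem.List.sorted (PySem.Set.ofList frames) (fun x => x) false)) := by
  set s := PySem.Set.ofList frames with hs
  set xs := PySem.List.sorted s (fun x => x) false with hxs
  have hperm : xs.Perm s := PySem.List.sorted_perm s (fun x => x) false
  have hpw : xs.Pairwise (· < ·) := PySem.List.sorted_ofList_pairwise_lt frames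
  have hcongr : s.filter (fun x => !(PySem.Set.contains s (g x)))
      = s.filter (fun y => !decide ((g y) ∈ xs)) := by
    refine List.filter_congr (fun y _ => ?_)
    have : PySem.Set.contains s (g y) = decide ((g y) ∈ xs) := by
      simp [PySem.Set.contains, hperm.mem_iff]
    rw [this]
  rw [hcongr]
  exact PySem.List.sorted_eq_of_perm_of_pairwise_lt _ _ _
    (hperm.filter _) (hpw.filter _)

-- ===== VERDICT (by name: the statement is the Claim_ definition above) =====
theorem frames_to_segments_spec : Claim_equal_frames_to_segments := by
  intro frames _
  unfold Spec_frames_to_segments frames_to_segments frames_to_segments_alt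
  by_cases h : frames = []
  · subst h; rfl
  · rw [if_neg h]
    have hne : PySem.List.sorted (PySem.Set.ofList frames) (fun x => x) false ≠ [] := by
      simp only [ne_eq, PySem.List.sorted_eq_nil_iff]
      exact pvOfList_ne_nil h
    obtain ⟨x, rest, hx⟩ := List.exists_cons_of_ne_nil hne
    simp only
    rw [pvSortedFilter frames (fun y => y - 1), pvSortedFilter frames (fun y => y + 1), hx]
    show pvALoop x x [] rest = _
    rw [pvALoop_eq_runs, List.nil_append]
    exact pvMain rest.length x rest (le_refl _)
      (hx ▸ PySem.List.sorted_ofList_pairwise_lt frames)
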